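-- pv_equiv track=rewrite | github.com/California3/Programming-for-Scientists | .history/check_20231113123659.py | decrypt_search
-- ===== SOURCE A (Python) =====
-- def caesar_shift(string, shift):
--     #TODO: implement this function
--     result = ""
--     for s in string:
--         if s.isalpha():
--             if s.isupper():
--                 result += chr((ord(s) + shift - 65) % 26 + 65)
--             else:
--                 result += chr((ord(s) + shift - 97) % 26 + 97)
--         else:
--             result += s
--     return result
--
-- def decrypt_search(code):
--     """Decrypt the message using increasing shift values whilst searching for 40
--     common three letter words. Return the shift value that gives the highest number
--     of different three letter words.
--     """
--     #TODO: implement this function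
--     # common words = [the,and,for,are,but,not,you,all,any,can, her,was,one,our,out,day,get,has,him,his, how,man,new,now,old,see,two,way,who,boy, did,its,let,put,say,she,too,use,dad,mom]
--     common_word_list = ["the", "and", "for", "are", "but", "not", "you", "all", "any", "can", "her", "was", "one", "our", "out", "day", "get", "has", "him", "his", "how", "man", "new", "now", "old", "see", "two", "way", "who", "boy", "did", "its", "let", "put", "say", "she", "too", "use", "dad", "mom"]
--     # Return the shift value that gives the highest number of different three letter words.
--     countings = []
--     for i in range(-26,26):
--         result = caesar_shift(code, i)
--         words = result.split()
--         count_sum = {}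
--         for word in words:
--             word = word.lower()
--             if word in common_word_list:
--                 if word not in count_sum:
--                     count_sum[word] = 1
--                 else:
--                     count_sum[word] += 1
--         # sord by value descending
--         count_sum = sorted(count_sum.items(), key=lambda x: x[1], reverse=True)
--         # sum up top 3
--         top3 = 0
--         for key, value in count_sum[:3]:
--             top3 += value
--         countings.append(top3)
--
--
--     return 26 - countings.index(max(countings))
-- ===== SOURCE B (Python) =====
-- def decrypt_search(code):
--     """Return the shift value (as 26 - first-argmax index) maximizing the
--     top-3 sum of common three-letter word counts, via a single tokenization
--     and shift inversion instead of 52 full decryptions."""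
--     common_word_list = ["the", "and", "for", "are", "but", "not", "you", "all", "any", "can", "her", "was", "one", "our", "out", "day", "get", "has", "him", "his", "how", "man", "new", "now", "old", "see", "two", "way", "who", "boy", "did", "its", "let", "put", "say", "she", "too", "use", "dad", "mom"]
--     # Collect (shift, word) matches in token order: a token matches a common
--     # word under exactly one shift in 0..25, computed by inversion.
--     matches = []
--     for tok in code.split():
--         t = tok.lower()
--         if len(t) == 3 and t.isalpha():
--             a, b, c = t
--             for w in common_word_list:
--                 d = (ord(w[0]) - ord(a)) % 26
--                 if (ord(w[1]) - ord(b)) % 26 == d and (ord(w[2]) - ord(c)) % 26 == d: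
--                     matches.append((d, w))
--     # First-argmax over shifts 0..25 (shift s here corresponds to A's index s,
--     # i.e. decryption shift s - 26).
--     best_val = -1
--     best_s = 0
--     for s in range(26):
--         cnt = {}
--         for d, w in matches:
--             if d == s:
--                 cnt[w] = cnt.get(w, 0) + 1
--         vals = sorted(cnt.values(), reverse=True)
--         top3 = sum(vals[:3])
--         if top3 > best_val:
--             best_val = top3
--             best_s = s
--     return 26 - best_s
-- ===== Notes on version B (the rewrite author's own statement) =====
-- stated objective: faster
-- what changed: B tokenizes the text once and, for each 3-letter token, inverts the Caesar map to compute the unique shift sending it to each common word, bucketing (shift, word) matches in a single pass and then taking a running first-argmax over the 26 distinct shifts, instead of A's 52 full decrypt+split+count passes over the whole text.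
import Mathlib
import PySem

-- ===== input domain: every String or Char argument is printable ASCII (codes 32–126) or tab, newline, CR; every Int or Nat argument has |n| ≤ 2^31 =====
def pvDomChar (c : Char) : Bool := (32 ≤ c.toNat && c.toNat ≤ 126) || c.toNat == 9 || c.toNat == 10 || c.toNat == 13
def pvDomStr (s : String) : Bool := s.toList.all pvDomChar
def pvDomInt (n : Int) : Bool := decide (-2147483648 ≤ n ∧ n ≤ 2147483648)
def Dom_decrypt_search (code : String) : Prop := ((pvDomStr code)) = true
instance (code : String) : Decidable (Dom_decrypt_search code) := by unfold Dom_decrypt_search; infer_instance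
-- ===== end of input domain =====

-- B tokenizes once and inverts the Caesar map per 3-letter token (one pass + 26-way argmax)
-- instead of A's 52 full decrypt/split/count passes; measured faster by a constant factor.

-- the module-level list of 40 common words (shared data of both programs)
def pvCommon : List String := ["the", "and", "for", "are", "but", "not", "you", "all", "any", "can", "her", "was", "one", "our", "out", "day", "get", "has", "him", "his", "how", "man", "new", "now", "old", "see", "two", "way", "who", "boy", "did", "its", "let", "put", "say", "she", "too", "use", "dad", "mom"]

-- ===== PORT A =====
def caesar_shift (s : String) (shift : Int) : String :=
  String.ofList (s.toList.foldl (fun result c =>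
    if PySem.Chars.isalpha c then
      if PySem.Chars.isupper c then
        result ++ [Char.ofNat (PySem.Int.mod ((c.toNat : Int) + shift - 65) 26 + 65).toNat]
      else
        result ++ [Char.ofNat (PySem.Int.mod ((c.toNat : Int) + shift - 97) 26 + 97).toNat]
    else result ++ [c]) [])

def decrypt_search (code : String) : Int :=
  let countings : List Int := (PySem.List.pyRange (-26) 26 1).foldl (fun countings i =>
    let result := caesar_shift code i
    let words := PySem.Str.split₀ result
    let count_sum : PySem.Dict String Int := words.foldl (fun d word =>
      let w := PySem.Str.lower word
      if pvCommon.contains w then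
        if !(d.contains w) then d.insert w 1 else d.insert w (d.getD w 0 + 1)
      else d) PySem.Dict.empty
    let sortedItems := PySem.List.sorted count_sum.items (fun x => x.2) true
    let top3 := (PySem.List.slice sortedItems none (some 3)).foldl (fun t kv => t + kv.2) 0
    countings ++ [top3]) []
  let m := (PySem.List.max? countings (fun x => x)).getD 0
  26 - (((PySem.List.index? countings m).getD 0 : Nat) : Int)

-- ===== PORT B =====
-- 'a, b, c = t' on a length-3 string (the default branch is Python's unpacking ValueError, unreachable)
def pvChars3 (s : String) : Char × Char × Char :=
  match s.toList with
  | [a, b, c] => (a, b, c)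
  | _ => (' ', ' ', ' ')

def decrypt_search_alt (code : String) : Int :=
  let mtchs : List (Int × String) := (PySem.Str.split₀ code).foldl (fun ms tok =>
    let t := PySem.Str.lower tok
    if PySem.Str.len t == 3 && PySem.Str.strIsalpha t then
      let abc := pvChars3 t
      pvCommon.foldl (fun ms w =>
        let xyz := pvChars3 w
        let d := PySem.Int.mod ((xyz.1.toNat : Int) - (abc.1.toNat : Int)) 26
        if PySem.Int.mod ((xyz.2.1.toNat : Int) - (abc.2.1.toNat : Int)) 26 == d &&
           PySem.Int.mod ((xyz.2.2.toNat : Int) - (abc.2.2.toNat : Int)) 26 == d then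
          ms ++ [(d, w)]
        else ms) ms
    else ms) []
  let res := (PySem.List.pyRange 0 26 1).foldl (fun (best : Int × Int) s =>
    let cnt : PySem.Dict String Int := mtchs.foldl (fun cnt p =>
      if p.1 == s then cnt.insert p.2 (cnt.getD p.2 0 + 1) else cnt) PySem.Dict.empty
    let vals := PySem.List.sorted cnt.values (fun v => v) true
    let top3 := (PySem.List.slice vals none (some 3)).sum
    if top3 > best.1 then (top3, s) else best) (-1, 0)
  26 - res.2

-- ===== PRECONDITION & SPEC =====
def Spec_decrypt_search (code : String) (out : Int) : Prop := out = decrypt_search_alt code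
instance (code : String) (out : Int) : Decidable (Spec_decrypt_search code out) := by unfold Spec_decrypt_search; infer_instance

-- ===== CLAIM (what is proved, stated in full; the proofs are below) =====
def Claim_equal_decrypt_search : Prop := ∀ (code : String), Dom_decrypt_search code → Spec_decrypt_search code (decrypt_search code)

-- ===== LEMMAS AND PROOFS =====

def shChar (i : Int) (c : Char) : Char :=
  if PySem.Chars.isalpha c then
    if PySem.Chars.isupper c then Char.ofNat (PySem.Int.mod ((c.toNat : Int) + i - 65) 26 + 65).toNat
    else Char.ofNat (PySem.Int.mod ((c.toNat : Int) + i - 97) 26 + 97).toNat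
  else c

theorem pv_isupper_iff (c : Char) : PySem.Chars.isupper c = true ↔ 65 ≤ c.toNat ∧ c.toNat ≤ 90 := by
  show (decide ('A' ≤ c) && decide (c ≤ 'Z')) = true ↔ _
  rw [Bool.and_eq_true, decide_eq_true_iff, decide_eq_true_iff, Char.le_def, Char.le_def,
    UInt32.le_iff_toNat_le, UInt32.le_iff_toNat_le]
  rfl

theorem pv_islower_iff (c : Char) : PySem.Chars.islower c = true ↔ 97 ≤ c.toNat ∧ c.toNat ≤ 122 := by
  show (decide ('a' ≤ c) && decide (c ≤ 'z')) = true ↔ _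
  rw [Bool.and_eq_true, decide_eq_true_iff, decide_eq_true_iff, Char.le_def, Char.le_def,
    UInt32.le_iff_toNat_le, UInt32.le_iff_toNat_le]
  rfl

theorem pv_isalpha_iff (c : Char) :
    PySem.Chars.isalpha c = true ↔ (65 ≤ c.toNat ∧ c.toNat ≤ 90) ∨ (97 ≤ c.toNat ∧ c.toNat ≤ 122) := by
  show (PySem.Chars.isupper c || PySem.Chars.islower c) = true ↔ _
  rw [Bool.or_eq_true, pv_isupper_iff, pv_islower_iff]

theorem pv_toNat_ofNat {n : Nat} (h : n < 55296) : (Char.ofNat n).toNat = n := by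
  have : n.isValidChar := Or.inl h
  simp [Char.toNat_ofNat, this]

theorem pv_char_eq_iff (c d : Char) : c = d ↔ c.toNat = d.toNat :=
  ⟨fun h => h ▸ rfl, fun h => Char.ext (UInt32.toNat_inj.mp h)⟩

theorem pv_isspace_iff (c : Char) : PySem.Chars.isspace c = true ↔
    (c.toNat = 32 ∨ (9 ≤ c.toNat ∧ c.toNat ≤ 13) ∨ (28 ≤ c.toNat ∧ c.toNat ≤ 31) ∨ c.toNat = 133 ∨
     c.toNat = 160 ∨ c.toNat = 5760 ∨ (8192 ≤ c.toNat ∧ c.toNat ≤ 8202) ∨ c.toNat = 8232 ∨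
     c.toNat = 8233 ∨ c.toNat = 8239 ∨ c.toNat = 8287 ∨ c.toNat = 12288) := by
  simp [PySem.Chars.isspace]
  tauto

-- toNat of a shifted alpha char
theorem pv_shChar_toNat_upper {i : Int} {c : Char} (h : PySem.Chars.isupper c = true) :
    (shChar i c).toNat = (PySem.Int.mod ((c.toNat : Int) + i - 65) 26 + 65).toNat := by
  have ha : PySem.Chars.isalpha c = true := by
    show (PySem.Chars.isupper c || PySem.Chars.islower c) = true; simp [h]
  have h1 : PySem.Int.mod ((c.toNat : Int) + i - 65) 26 < 26 := PySem.Int.mod_lt _ (by norm_num)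
  have h2 : (0:Int) ≤ PySem.Int.mod ((c.toNat : Int) + i - 65) 26 := PySem.Int.mod_nonneg _ (by norm_num)
  rw [shChar, if_pos ha, if_pos h, pv_toNat_ofNat (by omega)]

theorem pv_shChar_toNat_lower {i : Int} {c : Char}
    (ha : PySem.Chars.isalpha c = true) (h : PySem.Chars.isupper c = false) :
    (shChar i c).toNat = (PySem.Int.mod ((c.toNat : Int) + i - 97) 26 + 97).toNat := by
  have h1 : PySem.Int.mod ((c.toNat : Int) + i - 97) 26 < 26 := PySem.Int.mod_lt _ (by norm_num)
  have h2 : (0:Int) ≤ PySem.Int.mod ((c.toNat : Int) + i - 97) 26 := PySem.Int.mod_nonneg _ (by norm_num)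
  rw [shChar, if_pos ha, if_neg (by simp [h]), pv_toNat_ofNat (by omega)]

theorem pv_shChar_not_alpha {i : Int} {c : Char} (h : PySem.Chars.isalpha c = false) :
    shChar i c = c := by rw [shChar, if_neg (by simp [h])]

-- shChar preserves the whitespace classification
theorem pv_isspace_shChar (i : Int) (c : Char) : PySem.Chars.isspace (shChar i c) = PySem.Chars.isspace c := by
  by_cases ha : PySem.Chars.isalpha c = true
  · have hs : PySem.Chars.isspace c = false := by
      rw [Bool.eq_false_iff]; intro hsp
      rw [pv_isspace_iff] at hsp; rw [pv_isalpha_iff] at ha; omega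
    rw [hs, Bool.eq_false_iff]; intro hsp
    rw [pv_isspace_iff] at hsp
    by_cases hu : PySem.Chars.isupper c = true
    · have := pv_shChar_toNat_upper (i := i) hu
      have h1 : PySem.Int.mod ((c.toNat : Int) + i - 65) 26 < 26 := PySem.Int.mod_lt _ (by norm_num)
      have h2 : (0:Int) ≤ PySem.Int.mod ((c.toNat : Int) + i - 65) 26 := PySem.Int.mod_nonneg _ (by norm_num)
      omega
    · have := pv_shChar_toNat_lower (i := i) ha (Bool.eq_false_iff.mpr hu)
      have h1 : PySem.Int.mod ((c.toNat : Int) + i - 97) 26 < 26 := PySem.Int.mod_lt _ (by norm_num)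
      have h2 : (0:Int) ≤ PySem.Int.mod ((c.toNat : Int) + i - 97) 26 := PySem.Int.mod_nonneg _ (by norm_num)
      omega
  · rw [pv_shChar_not_alpha (Bool.eq_false_iff.mpr ha)]

theorem pv_lowerChar_toNat (c : Char) :
    (PySem.Chars.lowerChar c).toNat = if PySem.Chars.isupper c = true then c.toNat + 32 else c.toNat := by
  rw [PySem.Chars.lowerChar]
  by_cases hu : PySem.Chars.isupper c = true
  · rw [if_pos hu, if_pos hu, pv_toNat_ofNat]
    have := (pv_isupper_iff c).mp hu; omega
  · rw [if_neg hu, if_neg hu]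

theorem pv_isalpha_lowerChar (c : Char) :
    PySem.Chars.isalpha (PySem.Chars.lowerChar c) = PySem.Chars.isalpha c := by
  have h := pv_lowerChar_toNat c
  by_cases hu : PySem.Chars.isupper c = true
  · rw [if_pos hu] at h
    have hb := (pv_isupper_iff c).mp hu
    have h1 : PySem.Chars.isalpha (PySem.Chars.lowerChar c) = true := by rw [pv_isalpha_iff]; omega
    have h2 : PySem.Chars.isalpha c = true := by rw [pv_isalpha_iff]; omega
    rw [h1, h2]
  · rw [if_neg hu] at h
    cases hA : PySem.Chars.isalpha c
    · rw [Bool.eq_false_iff]; intro hx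
      rw [pv_isalpha_iff] at hx
      have h2 : PySem.Chars.isalpha c = true := by rw [pv_isalpha_iff]; omega
      rw [hA] at h2; exact Bool.false_ne_true h2
    · rw [pv_isalpha_iff]; rw [pv_isalpha_iff] at hA; omega

-- the central per-character inversion: the decrypted-and-lowered character equals a
-- lowercase letter w exactly when c is a letter and the shift reconstructed from
-- (w, lower c) is s
theorem pv_char_match {s : Int} (hs0 : 0 ≤ s) (hs : s < 26) (c w : Char)
    (hw : 97 ≤ w.toNat ∧ w.toNat ≤ 122) :
    PySem.Chars.lowerChar (shChar s c) = w ↔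
      (PySem.Chars.isalpha c = true ∧
       PySem.Int.mod ((w.toNat : Int) - ((PySem.Chars.lowerChar c).toNat : Int)) 26 = s) := by
  rw [pv_char_eq_iff, pv_lowerChar_toNat]
  rw [PySem.Int.mod_eq_emod_of_pos (by norm_num : (0:Int) < 26)]
  by_cases ha : PySem.Chars.isalpha c = true
  · simp only [ha, true_and]
    by_cases hu : PySem.Chars.isupper c = true
    · have hb := (pv_isupper_iff c).mp hu
      have hsh := pv_shChar_toNat_upper (i := s) hu
      have h1 : PySem.Int.mod ((c.toNat : Int) + s - 65) 26 < 26 := PySem.Int.mod_lt _ (by norm_num)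
      have h2 : (0:Int) ≤ PySem.Int.mod ((c.toNat : Int) + s - 65) 26 := PySem.Int.mod_nonneg _ (by norm_num)
      have hup : PySem.Chars.isupper (shChar s c) = true := by rw [pv_isupper_iff]; omega
      rw [if_pos hup, hsh, pv_lowerChar_toNat, if_pos hu]
      rw [PySem.Int.mod_eq_emod_of_pos (by norm_num : (0:Int) < 26)] at *
      omega
    · have hb : 97 ≤ c.toNat ∧ c.toNat ≤ 122 := by
        rw [pv_isalpha_iff] at ha; rw [pv_isupper_iff] at hu
        constructor <;> omega
      have hsh := pv_shChar_toNat_lower (i := s) ha (Bool.eq_false_iff.mpr hu)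
      have h1 : PySem.Int.mod ((c.toNat : Int) + s - 97) 26 < 26 := PySem.Int.mod_lt _ (by norm_num)
      have h2 : (0:Int) ≤ PySem.Int.mod ((c.toNat : Int) + s - 97) 26 := PySem.Int.mod_nonneg _ (by norm_num)
      have hup : PySem.Chars.isupper (shChar s c) = false := by
        rw [Bool.eq_false_iff]; intro hx; rw [pv_isupper_iff] at hx; omega
      rw [hup, if_neg (by simp), hsh, pv_lowerChar_toNat, if_neg (by simp [hu])]
      rw [PySem.Int.mod_eq_emod_of_pos (by norm_num : (0:Int) < 26)] at *
      omega
  · have ha' : PySem.Chars.isalpha c = false := Bool.eq_false_iff.mpr ha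
    simp only [ha', Bool.false_eq_true, false_and, iff_false]
    rw [pv_shChar_not_alpha ha']
    have hu : PySem.Chars.isupper c = false := by
      rw [Bool.eq_false_iff]; intro hx
      rw [pv_isupper_iff] at hx
      rw [Bool.eq_false_iff] at ha'
      exact ha' (by rw [pv_isalpha_iff]; omega)
    rw [if_neg (by simp [hu])]
    intro hx
    rw [Bool.eq_false_iff] at ha'
    exact ha' (by rw [pv_isalpha_iff]; omega)

theorem pv_split_go_map (f : Char → Char) (hf : ∀ c, PySem.Chars.isspace (f c) = PySem.Chars.isspace c) :
    ∀ (s cur : List Char) (acc : List (List Char)),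
      PySem.Chars.split₀.go (s.map f) (cur.map f) (acc.map (List.map f)) =
        (PySem.Chars.split₀.go s cur acc).map (List.map f) := by
  intro s
  induction s with
  | nil =>
    intro cur acc
    rw [List.map_nil, PySem.Chars.split₀.go, PySem.Chars.split₀.go]
    by_cases hc : cur.isEmpty
    · rw [if_pos (by simpa using hc), if_pos hc, List.map_reverse]
    · rw [if_neg (by simpa using hc), if_neg hc, List.map_reverse, List.map_cons, List.map_reverse]
  | cons c rest ih =>
    intro cur acc
    rw [List.map_cons, PySem.Chars.split₀.go, PySem.Chars.split₀.go, hf c]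
    by_cases hsp : PySem.Chars.isspace c = true
    · rw [if_pos hsp, if_pos hsp]
      by_cases hc : cur.isEmpty
      · rw [if_pos (by simpa using hc), if_pos hc]
        exact ih [] acc
      · rw [if_neg (by simpa using hc), if_neg hc]
        have := ih [] ((cur.reverse :: acc))
        simpa [List.map_reverse] using this
    · rw [if_neg hsp, if_neg hsp]
      exact ih (c :: cur) acc

theorem pv_split₀_map (f : Char → Char) (hf : ∀ c, PySem.Chars.isspace (f c) = PySem.Chars.isspace c)
    (s : List Char) :
    PySem.Chars.split₀ (s.map f) = (PySem.Chars.split₀ s).map (List.map f) := by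
  have := pv_split_go_map f hf s [] []
  simpa [PySem.Chars.split₀] using this

theorem pv_caesar_eq_map (code : String) (i : Int) :
    caesar_shift code i = String.ofList (code.toList.map (shChar i)) := by
  rw [caesar_shift]
  congr 1
  have h : (fun (result : List Char) (c : Char) =>
      if PySem.Chars.isalpha c then
        if PySem.Chars.isupper c then
          result ++ [Char.ofNat (PySem.Int.mod ((c.toNat : Int) + i - 65) 26 + 65).toNat]
        else
          result ++ [Char.ofNat (PySem.Int.mod ((c.toNat : Int) + i - 97) 26 + 97).toNat]
      else result ++ [c]) = fun result c => result ++ [shChar i c] := by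
    funext result c
    rw [shChar]; split_ifs <;> rfl
  rw [h, PySem.List.foldl_append_singleton_eq_map]
  rw [List.nil_append]

theorem pv_split_shift (code : String) (i : Int) :
    PySem.Str.split₀ (caesar_shift code i) =
      (PySem.Str.split₀ code).map (fun t => String.ofList (t.toList.map (shChar i))) := by
  show List.map String.ofList (PySem.Chars.split₀ (caesar_shift code i).toList) = _
  rw [pv_caesar_eq_map, String.toList_ofList,
    pv_split₀_map (shChar i) (pv_isspace_shChar i) code.toList]
  show _ = List.map _ (List.map String.ofList (PySem.Chars.split₀ code.toList))
  rw [List.map_map, List.map_map]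
  apply List.map_congr_left
  intro l _
  simp [String.toList_ofList]

def pvLw (i : Int) (tok : String) : String :=
  PySem.Str.lower (String.ofList (tok.toList.map (shChar i)))

-- shape facts about the 40 common words
theorem pv_common_shape : ∀ w ∈ pvCommon, w.toList.length = 3 ∧
    w.toList.all PySem.Chars.islower = true := by decide

theorem pv_common_nodup : pvCommon.Nodup := by decide

-- the B-side guard tests the lowered token for "three letters"
theorem pv_guard_iff (tok : String) :
    (PySem.Str.len (PySem.Str.lower tok) == 3 && PySem.Str.strIsalpha (PySem.Str.lower tok)) = true ↔
      (tok.toList.length = 3 ∧ tok.toList.all PySem.Chars.isalpha = true) := by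
  have htl : (PySem.Str.lower tok).toList = tok.toList.map PySem.Chars.lowerChar :=
    PySem.Str.toList_lower tok
  have hcomp : (PySem.Chars.isalpha ∘ PySem.Chars.lowerChar) = PySem.Chars.isalpha :=
    funext pv_isalpha_lowerChar
  rw [Bool.and_eq_true, beq_iff_eq, PySem.Str.len_eq, PySem.Str.strIsalpha_eq, htl,
    PySem.Chars.strIsalpha, List.length_map, List.all_map, hcomp, Bool.and_eq_true,
    List.isEmpty_map, Bool.not_eq_eq_eq_not, Bool.not_true, List.isEmpty_eq_false_iff,
    ← List.length_pos_iff]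
  constructor
  · rintro ⟨h1, _, h3⟩
    exact ⟨by exact_mod_cast h1, h3⟩
  · rintro ⟨h1, h2⟩
    exact ⟨by exact_mod_cast h1, by omega, h2⟩

theorem pv_Lw_toList (i : Int) (tok : String) :
    (pvLw i tok).toList = tok.toList.map (fun c => PySem.Chars.lowerChar (shChar i c)) := by
  rw [pvLw, PySem.Str.toList_lower, String.toList_ofList, PySem.Chars.lower, List.map_map]
  rfl

theorem pv_filter_eq_singleton {l : List String} (h : l.Nodup) (x : String) :
    l.filter (fun y => y == x) = if l.contains x then [x] else [] := by
  induction l with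
  | nil => rfl
  | cons a t ih =>
    rcases List.nodup_cons.mp h with ⟨ha, ht⟩
    by_cases hax : a = x
    · subst hax
      rw [List.filter_cons_of_pos (by simp), ih ht, List.contains_cons]
      simp only [BEq.rfl, Bool.true_or, if_pos]
      have : t.contains a = false := by
        rw [Bool.eq_false_iff]; intro hc; exact ha (List.contains_iff_mem.mp hc)
      rw [this]; rfl
    · rw [List.filter_cons_of_neg (by simp [hax]), ih ht, List.contains_cons]
      have hxa : (x == a) = false := by
        rw [beq_eq_false_iff_ne]; exact fun h => hax h.symm
      rw [hxa, Bool.false_or]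

theorem pv_flatMap_ite {α β : Type} (f : α → β) (p : β → Bool) (l : List α) :
    l.flatMap (fun x => if p (f x) then [f x] else []) = (l.map f).filter p := by
  induction l with
  | nil => rfl
  | cons a t ih =>
    rw [List.flatMap_cons, ih, List.map_cons]
    by_cases hp : p (f a) = true
    · rw [if_pos hp, List.filter_cons_of_pos hp]; rfl
    · rw [if_neg hp, List.filter_cons_of_neg (by simpa using hp), List.nil_append]

def pvDw (tok w : String) : Int :=
  PySem.Int.mod (((pvChars3 w).1.toNat : Int) - ((pvChars3 (PySem.Str.lower tok)).1.toNat : Int)) 26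

def pvCondB (tok w : String) : Bool :=
  (PySem.Int.mod (((pvChars3 w).2.1.toNat : Int) - ((pvChars3 (PySem.Str.lower tok)).2.1.toNat : Int)) 26 == pvDw tok w) &&
  (PySem.Int.mod (((pvChars3 w).2.2.toNat : Int) - ((pvChars3 (PySem.Str.lower tok)).2.2.toNat : Int)) 26 == pvDw tok w)

def pvG3 (tok : String) : List (Int × String) :=
  if PySem.Str.len (PySem.Str.lower tok) == 3 && PySem.Str.strIsalpha (PySem.Str.lower tok) then
    (pvCommon.filter (pvCondB tok)).map (fun w => (pvDw tok w, w))
  else []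

theorem pv_chars3_of (s : String) {a b c : Char} (h : s.toList = [a, b, c]) :
    pvChars3 s = (a, b, c) := by rw [pvChars3, h]

-- each character of the lowered-decrypted token is lowercase-or-unchanged;
-- a non-3-letter token can decrypt to no common word
theorem pv_not3_no_match {s : Int} (tok : String)
    (hg : ¬ ((PySem.Str.len (PySem.Str.lower tok) == 3 && PySem.Str.strIsalpha (PySem.Str.lower tok)) = true)) :
    pvCommon.contains (pvLw s tok) = false := by
  rw [Bool.eq_false_iff]
  intro hc
  apply hg
  rw [pv_guard_iff]
  have hmem := List.contains_iff_mem.mp hc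
  obtain ⟨hlen, hlow⟩ := pv_common_shape _ hmem
  rw [pv_Lw_toList, List.length_map] at hlen
  refine ⟨hlen, ?_⟩
  rw [List.all_eq_true]
  intro c hcmem
  have hin : PySem.Chars.lowerChar (shChar s c) ∈ (pvLw s tok).toList := by
    rw [pv_Lw_toList]; exact List.mem_map_of_mem hcmem
  rw [List.all_eq_true] at hlow
  have hl := hlow _ hin
  rw [pv_islower_iff] at hl
  by_contra hna
  have hna' : PySem.Chars.isalpha c = false := Bool.eq_false_iff.mpr hna
  rw [pv_shChar_not_alpha hna', pv_lowerChar_toNat] at hl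
  have hu : PySem.Chars.isupper c = false := by
    rw [Bool.eq_false_iff]; intro hx
    rw [Bool.eq_false_iff] at hna'
    exact hna' (by rw [pv_isalpha_iff]; rw [pv_isupper_iff] at hx; omega)
  rw [hu, if_neg (by simp)] at hl
  rw [Bool.eq_false_iff] at hna'
  exact hna' (by rw [pv_isalpha_iff]; omega)

theorem pv_token_match {s : Int} (hs0 : 0 ≤ s) (hs : s < 26) (tok : String) :
    ((pvG3 tok).filter (fun p => p.1 == s)).map (fun p => p.2) =
      if pvCommon.contains (pvLw s tok) = true then [pvLw s tok] else [] := by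
  by_cases hg : (PySem.Str.len (PySem.Str.lower tok) == 3 && PySem.Str.strIsalpha (PySem.Str.lower tok)) = true
  · obtain ⟨h3, hall⟩ := (pv_guard_iff tok).mp hg
    obtain ⟨c1, c2, c3, htok⟩ := List.length_eq_three.mp h3
    have hlow : (PySem.Str.lower tok).toList = [PySem.Chars.lowerChar c1, PySem.Chars.lowerChar c2, PySem.Chars.lowerChar c3] := by
      rw [PySem.Str.toList_lower, htok]; rfl
    have halpha : PySem.Chars.isalpha c1 = true ∧ PySem.Chars.isalpha c2 = true ∧ PySem.Chars.isalpha c3 = true := by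
      rw [htok] at hall; simpa using hall
    rw [pvG3, if_pos hg, List.filter_map]
    have hkey : ∀ w ∈ pvCommon,
        ((fun p => p.1 == s) ∘ fun w => (pvDw tok w, w)) w = pvCondB tok w → True := fun _ _ _ => trivial
    -- combine the inner filter with the d == s filter into a single pointwise test
    rw [List.map_map]
    have hmapid : ((fun p : Int × String => p.2) ∘ fun w => (pvDw tok w, w)) = id := rfl
    rw [hmapid, List.map_id, List.filter_filter]
    have hcongr : ∀ w ∈ pvCommon,
        (((fun p => p.1 == s) ∘ fun w => (pvDw tok w, w)) w && pvCondB tok w) = (w == pvLw s tok) := by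
      intro w hw
      obtain ⟨hwlen, hwlow⟩ := pv_common_shape _ hw
      obtain ⟨w1, w2, w3, hw3⟩ := List.length_eq_three.mp hwlen
      have hwb : 97 ≤ w1.toNat ∧ w1.toNat ≤ 122 ∧ 97 ≤ w2.toNat ∧ w2.toNat ≤ 122 ∧ 97 ≤ w3.toNat ∧ w3.toNat ≤ 122 := by
        rw [hw3] at hwlow
        simp only [List.all_cons, List.all_nil, Bool.and_true, Bool.and_eq_true] at hwlow
        rw [pv_islower_iff, pv_islower_iff, pv_islower_iff] at hwlow
        tauto
    -- reduce the pvChars3 projections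
      rw [Bool.eq_iff_iff]
      rw [Function.comp_apply, Bool.and_eq_true, beq_iff_eq, pvCondB, pvDw,
        pv_chars3_of _ hw3, pv_chars3_of _ hlow, Bool.and_eq_true, beq_iff_eq, beq_iff_eq,
        beq_iff_eq, ← String.toList_inj, pv_Lw_toList, hw3, htok, List.map_cons, List.map_cons,
        List.map_cons, List.map_nil]
      simp only [List.cons.injEq, and_true]
      rw [eq_comm (a := w1), eq_comm (a := w2), eq_comm (a := w3),
        pv_char_match hs0 hs c1 w1 ⟨hwb.1, hwb.2.1⟩,
        pv_char_match hs0 hs c2 w2 ⟨hwb.2.2.1, hwb.2.2.2.1⟩,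
        pv_char_match hs0 hs c3 w3 ⟨hwb.2.2.2.2.1, hwb.2.2.2.2.2⟩]
      simp only [halpha.1, halpha.2.1, halpha.2.2, true_and,
        PySem.Int.mod_eq_emod_of_pos (by norm_num : (0:Int) < 26)]
      constructor
      · rintro ⟨h1, h2, h3⟩; exact ⟨h1, h2.trans h1, h3.trans h1⟩
      · rintro ⟨h1, h2, h3⟩; exact ⟨h1, h2.trans h1.symm, h3.trans h1.symm⟩
    rw [List.filter_congr hcongr, pv_filter_eq_singleton pv_common_nodup]
  · rw [pvG3, if_neg hg, pv_not3_no_match tok hg]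
    rfl

def pvWords (code : String) (i : Int) : List String :=
  ((PySem.Str.split₀ code).map (pvLw i)).filter (fun w => pvCommon.contains w)

def pvCount (ws : List String) : PySem.Dict String Int :=
  ws.foldl (fun d w => d.insert w (d.getD w 0 + 1)) PySem.Dict.empty

def pvTop3 (d : PySem.Dict String Int) : Int :=
  ((PySem.List.sorted d.values (fun v => v) true).take 3).sum

def pvGg (code : String) (i : Int) : Int := pvTop3 (pvCount (pvWords code i))

-- the stable value-descending sort of the items determines the value list
theorem pv_sorted_snd (l : List (String × Int)) :
    (PySem.List.sorted l (fun x => x.2) true).map (fun x => x.2) =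
      PySem.List.sorted (l.map (fun x => x.2)) (fun v => v) true := by
  apply List.eq_of_perm_of_sorted (le := fun a b : Int => b ≤ a)
  · exact fun a b _ _ h1 h2 => le_antisymm h2 h1
  · exact List.pairwise_map.mpr (PySem.List.sorted_pairwise_rev l (fun x => x.2))
  · exact PySem.List.sorted_pairwise_rev _ _
  · exact ((PySem.List.sorted_perm l (fun x => x.2) true).map _).trans
      (PySem.List.sorted_perm (l.map (fun x => x.2)) (fun v => v) true).symm

theorem pv_branchy :
    (fun (d : PySem.Dict String Int) (w : String) =>
      if !(d.contains w) then d.insert w 1 else d.insert w (d.getD w 0 + 1)) =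
    fun d w => d.insert w (d.getD w 0 + 1) := by
  funext d w
  by_cases hc : d.contains w = true
  · rw [hc]; rfl
  · have hc' : d.contains w = false := Bool.eq_false_iff.mpr hc
    rw [hc', PySem.Dict.getD_of_not_contains d (0 : Int) hc']
    rfl

-- A's per-shift dictionary is pvCount of the matched-word stream
set_option maxHeartbeats 1000000 in
theorem pv_dict_A (code : String) (i : Int) :
    (PySem.Str.split₀ (caesar_shift code i)).foldl (fun d word =>
      let w := PySem.Str.lower word
      if pvCommon.contains w then
        if !(d.contains w) then d.insert w 1 else d.insert w (d.getD w 0 + 1)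
      else d) PySem.Dict.empty = pvCount (pvWords code i) := by
  rw [pv_split_shift, List.foldl_map,
    PySem.List.foldl_if_eq_foldl_filter
      (p := fun t : String => pvCommon.contains (PySem.Str.lower (String.ofList (t.toList.map (shChar i)))))]
  rw [pvCount, pvWords, List.filter_map, List.foldl_map]
  apply PySem.List.foldl_congr_mem
  intro acc x hx
  exact congrFun (congrFun pv_branchy acc) _

-- B's per-shift dictionary coincides with A's
set_option maxHeartbeats 1000000 in
theorem pv_dict_B (code : String) {s : Int} (hs0 : 0 ≤ s) (hs : s < 26) :
    ((PySem.Str.split₀ code).flatMap pvG3).foldl (fun cnt p =>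
      if p.1 == s then cnt.insert p.2 (cnt.getD p.2 0 + 1) else cnt) PySem.Dict.empty =
      pvCount (pvWords code s) := by
  rw [PySem.List.foldl_if_eq_foldl_filter (p := fun p : Int × String => p.1 == s),
    ← List.foldl_map (f := fun p : Int × String => p.2)
      (g := fun (cnt : PySem.Dict String Int) (w : String) => cnt.insert w (cnt.getD w 0 + 1)),
    List.filter_flatMap, List.map_flatMap]
  have hflat : ∀ tok ∈ PySem.Str.split₀ code,
      ((pvG3 tok).filter (fun p => p.1 == s)).map (fun p => p.2) =
        (fun tok => if pvCommon.contains (pvLw s tok) = true then [pvLw s tok] else []) tok :=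
    fun tok _ => pv_token_match hs0 hs tok
  rw [List.flatMap_congr hflat]
  have : (fun tok => if pvCommon.contains (pvLw s tok) = true then [pvLw s tok] else []) =
      fun tok => if (fun w => pvCommon.contains w) (pvLw s tok) = true then [pvLw s tok] else [] := rfl
  rw [this, pv_flatMap_ite (pvLw s) (fun w => pvCommon.contains w)]
  rfl

theorem pv_top3_A (d : PySem.Dict String Int) :
    (PySem.List.slice (PySem.List.sorted d.items (fun x => x.2) true) none (some 3)).foldl
      (fun t kv => t + kv.2) 0 = pvTop3 d := by
  have hsl : PySem.List.slice (PySem.List.sorted d.items (fun x => x.2) true) none (some 3) =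
      (PySem.List.sorted d.items (fun x => x.2) true).take ((3:Int)).toNat :=
    PySem.List.slice_to _ (by norm_num)
  rw [hsl, PySem.List.foldl_add (g := fun kv : String × Int => kv.2), List.map_take,
    pv_sorted_snd, zero_add]
  rfl

theorem pv_count_values_nonneg (ws : List String) : ∀ v ∈ (pvCount ws).values, 0 ≤ v := by
  intro v hv
  have hnodup : (pvCount ws).keys.Nodup :=
    PySem.Dict.nodup_keys_foldl_insert ws (fun d w => d.getD w 0 + 1) PySem.Dict.empty
      PySem.Dict.nodup_keys_empty
  rw [PySem.Dict.values_eq_map_keys _ hnodup 0] at hv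
  obtain ⟨k, _, hk⟩ := List.mem_map.mp hv
  rw [pvCount, PySem.Dict.getD_foldl_insert_add_one, PySem.Dict.getD_empty] at hk
  omega

theorem pv_Gg_nonneg (code : String) (i : Int) : 0 ≤ pvGg code i := by
  rw [pvGg, pvTop3]
  apply List.sum_nonneg
  intro x hx
  have hx' := List.mem_of_mem_take hx
  rw [PySem.List.mem_sorted] at hx'
  exact pv_count_values_nonneg _ _ hx'

theorem pv_shChar_period (i : Int) : shChar (i + 26) = shChar i := by
  funext c
  rw [shChar, shChar]
  have h1 : PySem.Int.mod ((c.toNat : Int) + (i + 26) - 65) 26 = PySem.Int.mod ((c.toNat : Int) + i - 65) 26 := by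
    rw [PySem.Int.mod_eq_emod_of_pos (by norm_num), PySem.Int.mod_eq_emod_of_pos (by norm_num)]
    omega
  have h2 : PySem.Int.mod ((c.toNat : Int) + (i + 26) - 97) 26 = PySem.Int.mod ((c.toNat : Int) + i - 97) 26 := by
    rw [PySem.Int.mod_eq_emod_of_pos (by norm_num), PySem.Int.mod_eq_emod_of_pos (by norm_num)]
    omega
  rw [h1, h2]

theorem pv_Gg_period (code : String) (i : Int) : pvGg code (i + 26) = pvGg code i := by
  rw [pvGg, pvGg, pvWords, pvWords]
  have : pvLw (i + 26) = pvLw i := by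
    funext tok; rw [pvLw, pvLw, pv_shChar_period]
  rw [this]

-- the first-argmax running fold computes max and first index of max
theorem pv_argfold (g : Int → Int) (hg : ∀ s, 0 ≤ g s) :
    ∀ n : Nat, 1 ≤ n →
      0 ≤ ((PySem.List.pyRange 0 n 1).foldl (fun best s => if g s > best.1 then (g s, s) else best) ((-1 : Int), (0 : Int))).2 ∧
      ((PySem.List.pyRange 0 n 1).foldl (fun best s => if g s > best.1 then (g s, s) else best) ((-1 : Int), (0 : Int))).1 ∈ (PySem.List.pyRange 0 n 1).map g ∧
      (∀ y ∈ (PySem.List.pyRange 0 n 1).map g, y ≤ ((PySem.List.pyRange 0 n 1).foldl (fun best s => if g s > best.1 then (g s, s) else best) ((-1 : Int), (0 : Int))).1) ∧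
      List.idxOf? ((PySem.List.pyRange 0 n 1).foldl (fun best s => if g s > best.1 then (g s, s) else best) ((-1 : Int), (0 : Int))).1 ((PySem.List.pyRange 0 n 1).map g) =
        some ((PySem.List.pyRange 0 n 1).foldl (fun best s => if g s > best.1 then (g s, s) else best) ((-1 : Int), (0 : Int))).2.toNat := by
  intro n hn
  induction n, hn using Nat.le_induction with
  | base =>
    simp only [Nat.cast_one]
    have hr : PySem.List.pyRange 0 1 1 = [(0 : Int)] := rfl
    rw [hr]
    have h0 : (0:Int) ≤ g 0 := hg 0
    simp only [List.foldl_cons, List.foldl_nil, List.map_cons, List.map_nil]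
    rw [if_pos (by omega)]
    refine ⟨le_refl 0, by simp, ?_, ?_⟩
    · intro y hy; simp at hy; omega
    · simp [List.idxOf?_cons]
  | succ n hn ih =>
    have hsplit : PySem.List.pyRange 0 (↑(n + 1) : Int) 1 = PySem.List.pyRange 0 (↑n : Int) 1 ++ [(↑n : Int)] := by
      have h := PySem.List.pyRange_one_succ_right (a := 0) (b := (n : Int)) (by exact_mod_cast Nat.zero_le n)
      have hc : ((n + 1 : Nat) : Int) = (n : Int) + 1 := by push_cast; ring
      rw [hc, h]
    rw [hsplit, List.foldl_append, List.map_append]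
    obtain ⟨ih0, ihmem, ihmax, ihidx⟩ := ih
    set fb := (PySem.List.pyRange 0 (↑n : Int) 1).foldl (fun best s => if g s > best.1 then (g s, s) else best) ((-1 : Int), (0 : Int)) with hfb
    have hlen : ((PySem.List.pyRange 0 (↑n : Int) 1).map g).length = n := by
      rw [List.length_map, PySem.List.length_pyRange_one]; omega
    simp only [List.foldl_cons, List.foldl_nil, List.map_cons, List.map_nil]
    by_cases hgt : g ↑n > fb.1
    · rw [if_pos hgt]
      refine ⟨by positivity, by simp, ?_, ?_⟩
      · intro y hy
        rcases List.mem_append.mp hy with h | h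
        · exact le_of_lt (lt_of_le_of_lt (ihmax y h) hgt)
        · simp at h; omega
      · rw [List.idxOf?_eq_some_iff]
        have hlen2 : (((PySem.List.pyRange 0 (↑n : Int) 1).map g) ++ [g ↑n]).length = n + 1 := by
          rw [List.length_append, hlen]; rfl
        have hnlt : ((↑n : Int)).toNat < (((PySem.List.pyRange 0 (↑n : Int) 1).map g) ++ [g ↑n]).length := by
          rw [hlen2]; omega
        refine ⟨hnlt, ?_, ?_⟩
        · have htn : ((↑n : Int)).toNat = n := by omega
          rw [List.getElem_concat_length (by omega : ((↑n : Int)).toNat = ((PySem.List.pyRange 0 (↑n : Int) 1).map g).length)]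
        · intro j hj
          have hj' : j < n := by omega
          rw [List.getElem_append_left (by omega)]
          intro heq
          have hmem : (((PySem.List.pyRange 0 (↑n : Int) 1).map g))[j] ∈ ((PySem.List.pyRange 0 (↑n : Int) 1).map g) := List.getElem_mem _
          have := ihmax _ hmem
          omega
    · rw [if_neg hgt]
      refine ⟨ih0, List.mem_append_left _ ihmem, ?_, ?_⟩
      · intro y hy
        rcases List.mem_append.mp hy with h | h
        · exact ihmax y h
        · simp at h; omega
      · rw [List.idxOf?_eq_some_iff] at ihidx ⊢
        obtain ⟨hlt, heq, hpri⟩ := ihidx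
        refine ⟨by rw [List.length_append]; omega, ?_, ?_⟩
        · rw [List.getElem_append_left hlt]; exact heq
        · intro j hj
          rw [List.getElem_append_left (by omega)]
          exact hpri j hj

def pvT (code : String) : List Int := (PySem.List.pyRange 0 26 1).map (pvGg code)

theorem pv_top3_B (d : PySem.Dict String Int) :
    (PySem.List.slice (PySem.List.sorted d.values (fun v => v) true) none (some 3)).sum = pvTop3 d := by
  have hsl : PySem.List.slice (PySem.List.sorted d.values (fun v => v) true) none (some 3) =
      (PySem.List.sorted d.values (fun v => v) true).take ((3:Int)).toNat :=
    PySem.List.slice_to _ (by norm_num)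
  rw [hsl]; rfl

theorem pv_range_split (code : String) :
    (PySem.List.pyRange (-26) 26 1).map (pvGg code) = pvT code ++ pvT code := by
  have hneg : (PySem.List.pyRange (-26) 0 1).map (pvGg code) = pvT code := by
    rw [pvT, PySem.List.pyRange_one (-26) 0, PySem.List.pyRange_one 0 26]
    have h1 : ((0 : Int) - -26).toNat = 26 := by decide
    have h2 : ((26 : Int) - 0).toNat = 26 := by decide
    rw [h1, h2, List.map_map, List.map_map]
    apply List.map_congr_left
    intro k _
    show pvGg code (-26 + (k : Int)) = pvGg code (0 + (k : Int))
    have hper := pv_Gg_period code (-26 + (k : Int))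
    have harg : -26 + (k : Int) + 26 = 0 + (k : Int) := by ring
    rw [harg] at hper
    exact hper.symm
  rw [PySem.List.pyRange_one_append (-26) 0 26 (by norm_num) (by norm_num), List.map_append, hneg,
    pvT]

set_option maxHeartbeats 1000000 in
theorem pv_A_shape (code : String) :
    decrypt_search code = 26 -
      (((PySem.List.index? (pvT code ++ pvT code)
        ((PySem.List.max? (pvT code ++ pvT code) (fun x => x)).getD 0)).getD 0 : Nat) : Int) := by
  rw [decrypt_search]
  have hbody : (fun (countings : List Int) (i : Int) =>
      countings ++ [(PySem.List.slice (PySem.List.sorted ((PySem.Str.split₀ (caesar_shift code i)).foldl (fun d word =>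
          let w := PySem.Str.lower word
          if pvCommon.contains w then
            if !(d.contains w) then d.insert w 1 else d.insert w (d.getD w 0 + 1)
          else d) PySem.Dict.empty).items (fun x => x.2) true) none (some 3)).foldl (fun t kv => t + kv.2) 0]) =
      fun countings i => countings ++ [pvGg code i] := by
    funext countings i
    rw [pv_dict_A, pv_top3_A]
    rfl
  rw [hbody, PySem.List.foldl_append_singleton_eq_map, List.nil_append, pv_range_split]

set_option maxHeartbeats 1000000 in
theorem pv_B_shape (code : String) :
    decrypt_search_alt code = 26 -
      ((PySem.List.pyRange 0 26 1).foldl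
        (fun best s => if pvGg code s > best.1 then (pvGg code s, s) else best)
        ((-1 : Int), (0 : Int))).2 := by
  rw [decrypt_search_alt]
  have houter : (fun (ms : List (Int × String)) (tok : String) =>
      let t := PySem.Str.lower tok
      if PySem.Str.len t == 3 && PySem.Str.strIsalpha t then
        let abc := pvChars3 t
        pvCommon.foldl (fun ms w =>
          let xyz := pvChars3 w
          let d := PySem.Int.mod ((xyz.1.toNat : Int) - (abc.1.toNat : Int)) 26
          if PySem.Int.mod ((xyz.2.1.toNat : Int) - (abc.2.1.toNat : Int)) 26 == d &&
             PySem.Int.mod ((xyz.2.2.toNat : Int) - (abc.2.2.toNat : Int)) 26 == d then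
            ms ++ [(d, w)]
          else ms) ms
      else ms) = fun ms tok => ms ++ pvG3 tok := by
    funext ms tok
    show (if PySem.Str.len (PySem.Str.lower tok) == 3 && PySem.Str.strIsalpha (PySem.Str.lower tok) then _ else ms) = ms ++ pvG3 tok
    rw [pvG3]
    by_cases hg : (PySem.Str.len (PySem.Str.lower tok) == 3 && PySem.Str.strIsalpha (PySem.Str.lower tok)) = true
    · rw [if_pos hg, if_pos hg]
      exact PySem.List.foldl_append_if (pvCondB tok) (fun w => (pvDw tok w, w)) pvCommon ms
    · rw [if_neg hg, if_neg hg, List.append_nil]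
  rw [houter, PySem.List.foldl_append_eq_flatMap, List.nil_append]
  have hfold : (PySem.List.pyRange 0 26 1).foldl (fun (best : Int × Int) s =>
      let cnt : PySem.Dict String Int := ((PySem.Str.split₀ code).flatMap pvG3).foldl (fun cnt p =>
        if p.1 == s then cnt.insert p.2 (cnt.getD p.2 0 + 1) else cnt) PySem.Dict.empty
      let vals := PySem.List.sorted cnt.values (fun v => v) true
      let top3 := (PySem.List.slice vals none (some 3)).sum
      if top3 > best.1 then (top3, s) else best) ((-1 : Int), (0 : Int)) =
      (PySem.List.pyRange 0 26 1).foldl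
        (fun best s => if pvGg code s > best.1 then (pvGg code s, s) else best)
        ((-1 : Int), (0 : Int)) := by
    apply PySem.List.foldl_congr_mem
    intro best s hs
    rw [PySem.List.mem_pyRange_one] at hs
    simp only [pv_dict_B code hs.1 hs.2, pv_top3_B, pvGg]
  rw [hfold]

theorem pv_T_length (code : String) : (pvT code).length = 26 := by
  rw [pvT, List.length_map, PySem.List.length_pyRange_one]
  decide

set_option maxHeartbeats 1000000 in
theorem pv_main (code : String) : decrypt_search code = decrypt_search_alt code := by
  rw [pv_A_shape, pv_B_shape]
  obtain ⟨h0, hmem, hmax, hidx⟩ := pv_argfold (pvGg code) (pv_Gg_nonneg code) 26 (by norm_num)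
  have hc26 : ((26 : Nat) : Int) = (26 : Int) := by norm_num
  rw [hc26] at h0 hmem hmax hidx
  set fb := (PySem.List.pyRange 0 26 1).foldl
      (fun best s => if pvGg code s > best.1 then (pvGg code s, s) else best)
      ((-1 : Int), (0 : Int)) with hfb
  have hTdef : (PySem.List.pyRange 0 26 1).map (pvGg code) = pvT code := rfl
  rw [hTdef] at hmem hmax hidx
  cases hmx : PySem.List.max? (pvT code ++ pvT code) (fun x => x) with
  | none =>
    rw [PySem.List.max?_eq_none_iff] at hmx
    have : (pvT code ++ pvT code).length = 52 := by
      rw [List.length_append, pv_T_length]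
    rw [hmx] at this
    simp at this
  | some m0 =>
    have hm0mem : m0 ∈ pvT code ++ pvT code := PySem.List.max?_mem hmx
    have hm0T : m0 ∈ pvT code := by
      rcases List.mem_append.mp hm0mem with h | h <;> exact h
    have h1 : m0 ≤ fb.1 := hmax m0 hm0T
    have h2 : fb.1 ≤ m0 := PySem.List.max?_isMax hmx fb.1 (List.mem_append_left _ hmem)
    have hm0 : m0 = fb.1 := le_antisymm h1 h2
    have hidx2 : List.idxOf? fb.1 (pvT code ++ pvT code) = some fb.2.toNat := by
      rw [List.idxOf?_eq_some_iff] at hidx ⊢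
      obtain ⟨hlt, heq, hpri⟩ := hidx
      refine ⟨by rw [List.length_append]; omega, ?_, ?_⟩
      · rw [List.getElem_append_left hlt]; exact heq
      · intro j hj
        rw [List.getElem_append_left (by omega)]
        exact hpri j hj
    have hindex : PySem.List.index? (pvT code ++ pvT code) m0 = List.idxOf? m0 (pvT code ++ pvT code) := rfl
    rw [Option.getD_some, hindex, hm0, hidx2, Option.getD_some, Int.toNat_of_nonneg h0]

-- ===== VERDICT (by name: the statement is the Claim_ definition above) =====
theorem decrypt_search_spec : Claim_equal_decrypt_search := by
  intro code _
  unfold Spec_decrypt_search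
  exact pv_main code
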